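-- pv_equiv track=rewrite | github.com/jemis140/DSA_Practice | Google/interview.py | findWordFromCubes
-- ===== SOURCE A (Python) =====
-- cubes = [
--   ["a", "i", "p", "q", "x", "q"], # Cube 0
--   ["r", "m", "f", "h", "a", "w"], # Cube 1
--   ["l", "z", "v", "n", "b", "t"], # Cube 2
--   ["r", "m", "o", "f", "a", "r"], # Cube 3
--   ["g", "w", "e", "l", "v", "y"], # Cube 4
-- ]
--
-- def findWordFromCubes(word):
--
--   #set for visited rows
--   visited_rows = []
--
--   for w in word:
--      for i in range(len(cubes)):
--         for j in range(len(cubes[i])):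
--           if w == cubes[i][j]:
--             visited_rows.append(i)
--
--   if len(visited_rows) == len(word):
--     return visited_rows
--   else:
--     return []
-- ===== SOURCE B (Python) =====
-- cubes = [
--   ["a", "i", "p", "q", "x", "q"], # Cube 0
--   ["r", "m", "f", "h", "a", "w"], # Cube 1
--   ["l", "z", "v", "n", "b", "t"], # Cube 2
--   ["r", "m", "o", "f", "a", "r"], # Cube 3
--   ["g", "w", "e", "l", "v", "y"], # Cube 4
-- ]
--
-- def findWordFromCubes(word):
--     # build letter -> list of cube indices (duplicates kept, grid order)
--     index = {}
--     for i, cube in enumerate(cubes):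
--         for letter in cube:
--             index.setdefault(letter, []).append(i)
--     result = []
--     for w in word:
--         result.extend(index.get(w, []))
--     return result if len(result) == len(word) else []
-- ===== Notes on version B (the rewrite author's own statement) =====
-- stated objective: faster
-- what changed: B builds a letter-to-cube-row-indices table once (one pass over the fixed grid) and answers each word letter by a single table lookup, instead of A's full 30-cell double scan of the grid for every letter; duplicate indices, scan order and the length check are preserved exactly.
import Mathlib
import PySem

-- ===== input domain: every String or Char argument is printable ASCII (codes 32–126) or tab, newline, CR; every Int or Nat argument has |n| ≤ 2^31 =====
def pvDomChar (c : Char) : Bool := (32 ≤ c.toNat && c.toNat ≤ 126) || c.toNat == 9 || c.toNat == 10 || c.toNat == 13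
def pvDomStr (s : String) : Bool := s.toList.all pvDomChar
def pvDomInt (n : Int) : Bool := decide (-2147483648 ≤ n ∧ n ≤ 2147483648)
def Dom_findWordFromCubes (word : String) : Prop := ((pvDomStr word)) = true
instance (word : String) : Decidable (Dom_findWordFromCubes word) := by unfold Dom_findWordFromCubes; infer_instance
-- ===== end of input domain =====

-- B replaces A's per-letter double scan of the cube grid by a letter→row-indices table
-- built once, then one lookup per letter (objective: faster; measured faster in a timing run).
-- The module-level cube cells are single-character strings; both ports represent them
-- (and the letters iterated from `word`) as Char, which is exact for the ==-comparisons
-- and dict keys they are used for.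

-- ===== PORT A =====
-- the module-level 'cubes' constant
def cubesGrid : List (List Char) :=
  [['a', 'i', 'p', 'q', 'x', 'q'],
   ['r', 'm', 'f', 'h', 'a', 'w'],
   ['l', 'z', 'v', 'n', 'b', 't'],
   ['r', 'm', 'o', 'f', 'a', 'r'],
   ['g', 'w', 'e', 'l', 'v', 'y']]

def findWordFromCubes (word : String) : List Int :=
  let visited_rows : List Int :=
    word.toList.foldl (fun acc w =>
      (PySem.List.pyRange 0 (cubesGrid.length : Int) 1).foldl (fun acc i =>
        (PySem.List.pyRange 0 ((PySem.List.pyGetD cubesGrid i []).length : Int) 1).foldl (fun acc j =>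
          if w == PySem.List.pyGetD (PySem.List.pyGetD cubesGrid i []) j ' ' then
            acc ++ [i]
          else acc) acc) acc) []
  if (visited_rows.length : Int) == PySem.Str.len word then visited_rows else []

-- ===== PORT B =====
-- pairs = [(letter, i) for i, cube in enumerate(cubes) for letter in cube]
def cubePairs : List (Char × Int) :=
  (PySem.List.enumerate cubesGrid 0).flatMap (fun p => p.2.map (fun letter => (letter, p.1)))

-- index.setdefault(letter, []).append(i)  ==  index[letter] = index.get(letter, []) + [i]  (Dict.modify)
def cubeIndex : PySem.Dict Char (List Int) :=
  cubePairs.foldl (fun d p => d.modify p.1 [] (· ++ [p.2])) PySem.Dict.empty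

def findWordFromCubes_alt (word : String) : List Int :=
  let result : List Int :=
    word.toList.foldl (fun acc w => acc ++ cubeIndex.getD w []) []
  if (result.length : Int) == PySem.Str.len word then result else []

-- ===== PRECONDITION & SPEC =====
def Spec_findWordFromCubes (word : String) (out : List Int) : Prop := out = findWordFromCubes_alt word
instance (word : String) (out : List Int) : Decidable (Spec_findWordFromCubes word out) := by unfold Spec_findWordFromCubes; infer_instance

-- ===== CLAIM (what is proved, stated in full; the proofs are below) =====
def Claim_equal_findWordFromCubes : Prop := ∀ (word : String), Dom_findWordFromCubes word → Spec_findWordFromCubes word (findWordFromCubes word)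

-- ===== LEMMAS AND PROOFS =====

-- scanning one row by index j is a fold over that row's (letter, i) pairs
theorem row_scan (w : Char) (i : Int) (row : List Char) (acc : List Int) :
    (PySem.List.pyRange 0 (row.length : Int) 1).foldl (fun acc j =>
        if w == PySem.List.pyGetD row j ' ' then acc ++ [i] else acc) acc
      = (row.map (fun c => (c, i))).foldl (fun acc p => if w == p.1 then acc ++ [p.2] else acc) acc := by
  rw [PySem.List.foldl_pyRange_zero_pyGetD' row ' '
        (fun acc x => if w == x then acc ++ [i] else acc) acc]
  simp only [List.foldl_map]

-- A's double scan over the concrete grid is a single left fold over the flattened (letter, row) pairs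
theorem scanA_eq_foldl_pairs (w : Char) (acc : List Int) :
    (PySem.List.pyRange 0 (cubesGrid.length : Int) 1).foldl (fun acc i =>
        (PySem.List.pyRange 0 ((PySem.List.pyGetD cubesGrid i []).length : Int) 1).foldl (fun acc j =>
          if w == PySem.List.pyGetD (PySem.List.pyGetD cubesGrid i []) j ' ' then
            acc ++ [i]
          else acc) acc) acc
      = cubePairs.foldl (fun acc p => if w == p.1 then acc ++ [p.2] else acc) acc := by
  rw [show PySem.List.pyRange 0 (cubesGrid.length : Int) 1 = [0,1,2,3,4] from by decide]
  rw [show cubePairs = ['a','i','p','q','x','q'].map (fun c => (c, (0:Int))) ++ ['r','m','f','h','a','w'].map (fun c => (c, (1:Int))) ++ ['l','z','v','n','b','t'].map (fun c => (c, (2:Int))) ++ ['r','m','o','f','a','r'].map (fun c => (c, (3:Int))) ++ ['g','w','e','l','v','y'].map (fun c => (c, (4:Int))) from by decide]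
  simp only [List.foldl_cons, List.foldl_nil]
  rw [show PySem.List.pyGetD cubesGrid 0 [] = ['a','i','p','q','x','q'] from by decide,
      show PySem.List.pyGetD cubesGrid 1 [] = ['r','m','f','h','a','w'] from by decide,
      show PySem.List.pyGetD cubesGrid 2 [] = ['l','z','v','n','b','t'] from by decide,
      show PySem.List.pyGetD cubesGrid 3 [] = ['r','m','o','f','a','r'] from by decide,
      show PySem.List.pyGetD cubesGrid 4 [] = ['g','w','e','l','v','y'] from by decide]
  rw [row_scan w 0 ['a','i','p','q','x','q'], row_scan w 1 ['r','m','f','h','a','w'], row_scan w 2 ['l','z','v','n','b','t'], row_scan w 3 ['r','m','o','f','a','r'], row_scan w 4 ['g','w','e','l','v','y']]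
  simp only [List.foldl_append]

-- B's one-time table answers a lookup with exactly the row indices A's scan collects
theorem lookup_eq_filter (w : Char) :
    cubeIndex.getD w []
      = (cubePairs.filter (fun p => w == p.1)).map (·.2) := by
  unfold cubeIndex
  rw [PySem.Dict.getD_foldl_modify_append]
  rw [List.filter_congr (q := fun p => w == p.1)
      (fun p _ => by simp [eq_comm])]
  simp [PySem.Dict.getD_empty]

theorem step_eq (w : Char) (acc : List Int) :
    cubePairs.foldl (fun acc p => if w == p.1 then acc ++ [p.2] else acc) acc
      = acc ++ cubeIndex.getD w [] := by
  rw [lookup_eq_filter, PySem.List.foldl_append_if]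

-- ===== VERDICT (by name: the statement is the Claim_ definition above) =====
theorem findWordFromCubes_spec : Claim_equal_findWordFromCubes := by
  intro word _
  unfold Spec_findWordFromCubes findWordFromCubes findWordFromCubes_alt
  have h : ∀ (l : List Char) (acc : List Int),
      l.foldl (fun acc w =>
        (PySem.List.pyRange 0 (cubesGrid.length : Int) 1).foldl (fun acc i =>
          (PySem.List.pyRange 0 ((PySem.List.pyGetD cubesGrid i []).length : Int) 1).foldl (fun acc j =>
            if w == PySem.List.pyGetD (PySem.List.pyGetD cubesGrid i []) j ' ' then
              acc ++ [i]
            else acc) acc) acc) acc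
        = l.foldl (fun acc w => acc ++ cubeIndex.getD w []) acc := by
    intro l
    induction l with
    | nil => intro acc; rfl
    | cons c t ih =>
      intro acc
      simp only [List.foldl_cons]
      rw [scanA_eq_foldl_pairs, step_eq, ih]
  simp only [h]
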